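-- pv_equiv track=rewrite | github.com/Ethara-Ai/pzprjs | games/sar/puzzle_minesweeper2.py | _build_moves
-- ===== SOURCE A (Python) =====
-- def _build_moves(rows, cols, mines):
--     mine_set = set(mines)
--     moves_full = []
--     moves_required = []
--     for r in range(rows):
--         for c in range(cols):
--             if (r, c) in mine_set:
--                 x = 2 * c + 1
--                 y = 2 * r + 1
--                 move = f"mouse,left,{x},{y}"
--                 moves_full.append(move)
--                 moves_required.append(move)
--     return moves_full, moves_required, []
-- ===== SOURCE B (Python) =====
-- def _build_moves(rows, cols, mines):
--     # Iterate only over the deduped in-bounds mines, sorted by row-major rank,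
--     # instead of scanning the whole rows*cols grid.
--     cells = sorted({(r, c) for r, c in mines if 0 <= r < rows and 0 <= c < cols},
--                    key=lambda rc: rc[0] * cols + rc[1])
--     moves = ["mouse,left,{},{}".format(2 * c + 1, 2 * r + 1) for r, c in cells]
--     return moves, moves[:], []
-- ===== Notes on version B (the rewrite author's own statement) =====
-- stated objective: faster
-- what changed: Instead of scanning every grid cell and testing set membership, B dedups the in-bounds mines and sorts them by row-major rank r*cols+c, emitting one move per mine.
import Mathlib
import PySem

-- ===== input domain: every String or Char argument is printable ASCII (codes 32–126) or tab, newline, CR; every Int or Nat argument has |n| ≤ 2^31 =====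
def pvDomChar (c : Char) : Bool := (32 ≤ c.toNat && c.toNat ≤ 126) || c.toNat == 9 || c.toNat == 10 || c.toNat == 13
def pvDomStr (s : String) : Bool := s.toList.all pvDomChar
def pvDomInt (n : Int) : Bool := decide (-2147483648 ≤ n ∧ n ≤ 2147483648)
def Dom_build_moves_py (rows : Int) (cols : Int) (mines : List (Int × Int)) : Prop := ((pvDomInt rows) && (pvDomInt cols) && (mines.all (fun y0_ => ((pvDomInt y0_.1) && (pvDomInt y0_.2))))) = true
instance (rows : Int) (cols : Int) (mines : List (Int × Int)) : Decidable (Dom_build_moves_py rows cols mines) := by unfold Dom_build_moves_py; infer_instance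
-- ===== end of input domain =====

-- B replaces A's full rows*cols grid scan by sorting the deduped in-bounds mines by row-major rank (faster when mines are sparse).

-- ===== PORT A =====
def build_moves_py (rows : Int) (cols : Int) (mines : List (Int × Int)) : List String × List String × List String :=
  let mine_set : PySem.Set (Int × Int) := PySem.Set.ofList mines
  let st :=
    (PySem.List.pyRange 0 rows 1).foldl (fun acc r =>
      (PySem.List.pyRange 0 cols 1).foldl (fun acc2 c =>
        if (r, c) ∈ mine_set then
          let move := "mouse,left," ++ PySem.Int.toStr (2 * c + 1) ++ "," ++ PySem.Int.toStr (2 * r + 1)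
          (acc2.1 ++ [move], acc2.2 ++ [move])
        else acc2) acc) (([], []) : List String × List String)
  (st.1, st.2, [])

-- ===== PORT B =====
def build_moves_py_alt (rows : Int) (cols : Int) (mines : List (Int × Int)) : List String × List String × List String :=
  let cells := PySem.List.sorted
      (PySem.Set.ofList (mines.filter (fun p => decide (0 ≤ p.1 ∧ p.1 < rows ∧ 0 ≤ p.2 ∧ p.2 < cols))))
      (fun p => p.1 * cols + p.2) false
  let moves := cells.map (fun p =>
    "mouse,left," ++ PySem.Int.toStr (2 * p.2 + 1) ++ "," ++ PySem.Int.toStr (2 * p.1 + 1))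
  (moves, moves, [])

-- ===== PRECONDITION & SPEC =====
def Spec_build_moves_py (rows : Int) (cols : Int) (mines : List (Int × Int)) (out : List String × List String × List String) : Prop := out = build_moves_py_alt rows cols mines
instance (rows : Int) (cols : Int) (mines : List (Int × Int)) (out : List String × List String × List String) : Decidable (Spec_build_moves_py rows cols mines out) := by unfold Spec_build_moves_py; infer_instance

-- ===== CLAIM (what is proved, stated in full; the proofs are below) =====
def Claim_equal_build_moves_py : Prop := ∀ (rows : Int) (cols : Int) (mines : List (Int × Int)), Dom_build_moves_py rows cols mines → Spec_build_moves_py rows cols mines (build_moves_py rows cols mines)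

-- ===== LEMMAS AND PROOFS =====

-- the move string for a cell
def pvFmt (p : Int × Int) : String :=
  "mouse,left," ++ PySem.Int.toStr (2 * p.2 + 1) ++ "," ++ PySem.Int.toStr (2 * p.1 + 1)

-- the cells A's grid scan visits and keeps, in row-major order, as pairs
def pvCells (rows : Int) (cols : Int) (mines : List (Int × Int)) : List (Int × Int) :=
  (PySem.List.pyRange 0 rows 1).flatMap (fun r =>
    ((PySem.List.pyRange 0 cols 1).filter (fun c => decide ((r, c) ∈ PySem.Set.ofList mines))).map (fun c => (r, c)))

theorem pvPairFold (p : Int → Bool) (f : Int → String) (l : List Int) (acc : List String × List String) :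
    l.foldl (fun a c => if p c then (a.1 ++ [f c], a.2 ++ [f c]) else a) acc
      = (acc.1 ++ (l.filter p).map f, acc.2 ++ (l.filter p).map f) := by
  induction l generalizing acc with
  | nil => simp
  | cons x t ih =>
    by_cases h : p x <;> simp [h, ih]

theorem pvOuterFold (g : Int → List String) (l : List Int) (acc : List String × List String) :
    l.foldl (fun a r => (a.1 ++ g r, a.2 ++ g r)) acc
      = (acc.1 ++ l.flatMap g, acc.2 ++ l.flatMap g) := by
  induction l generalizing acc with
  | nil => simp
  | cons x t ih => simp [ih]

theorem pvA_eq (rows cols : Int) (mines : List (Int × Int)) :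
    build_moves_py rows cols mines
      = ((pvCells rows cols mines).map pvFmt, (pvCells rows cols mines).map pvFmt, []) := by
  unfold build_moves_py pvCells
  have hin : ∀ r acc,
      (PySem.List.pyRange 0 cols 1).foldl (fun acc2 c =>
        if (r, c) ∈ PySem.Set.ofList mines then
          (acc2.1 ++ ["mouse,left," ++ PySem.Int.toStr (2 * c + 1) ++ "," ++ PySem.Int.toStr (2 * r + 1)],
           acc2.2 ++ ["mouse,left," ++ PySem.Int.toStr (2 * c + 1) ++ "," ++ PySem.Int.toStr (2 * r + 1)])
        else acc2) acc
      = (acc.1 ++ ((PySem.List.pyRange 0 cols 1).filter (fun c => decide ((r, c) ∈ PySem.Set.ofList mines))).map (fun c => pvFmt (r, c)),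
         acc.2 ++ ((PySem.List.pyRange 0 cols 1).filter (fun c => decide ((r, c) ∈ PySem.Set.ofList mines))).map (fun c => pvFmt (r, c))) := by
    intro r acc
    simpa [pvFmt] using pvPairFold (fun c => decide ((r, c) ∈ PySem.Set.ofList mines))
      (fun c => pvFmt (r, c)) (PySem.List.pyRange 0 cols 1) acc
  simp only [hin]
  rw [pvOuterFold (fun r => ((PySem.List.pyRange 0 cols 1).filter (fun c => decide ((r, c) ∈ PySem.Set.ofList mines))).map (fun c => pvFmt (r, c)))]
  simp [List.map_flatMap, Function.comp_def]

theorem pvMem_cells (rows cols : Int) (mines : List (Int × Int)) (p : Int × Int) :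
    p ∈ pvCells rows cols mines ↔ p ∈ mines ∧ 0 ≤ p.1 ∧ p.1 < rows ∧ 0 ≤ p.2 ∧ p.2 < cols := by
  cases p with
  | mk r c =>
    simp only [pvCells, List.mem_flatMap, List.mem_map, List.mem_filter,
      PySem.List.mem_pyRange_one, PySem.Set.mem_ofList, decide_eq_true_eq]
    constructor
    · rintro ⟨r', hr', c', ⟨hc', hm⟩, heq⟩
      injection heq with h1 h2; subst h1; subst h2
      exact ⟨hm, hr'.1, hr'.2, hc'.1, hc'.2⟩
    · rintro ⟨hm, h1, h2, h3, h4⟩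
      exact ⟨r, ⟨h1, h2⟩, c, ⟨⟨h3, h4⟩, hm⟩, rfl⟩

theorem pvNodup_cells (rows cols : Int) (mines : List (Int × Int)) :
    (pvCells rows cols mines).Nodup := by
  unfold pvCells
  rw [List.flatMap_def, List.nodup_flatten]
  constructor
  · intro s hs
    simp only [List.mem_map] at hs
    obtain ⟨r, _, rfl⟩ := hs
    refine List.Nodup.map (fun a b h => by simpa using h) ?_
    exact (PySem.List.nodup_pyRange_one 0 cols).filter _
  · refine List.Pairwise.map _ ?_ (PySem.List.pairwise_lt_pyRange_one 0 rows)
    intro r r' hlt x hx hx'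
    simp only [List.mem_map, List.mem_filter] at hx hx'
    obtain ⟨c, _, rfl⟩ := hx
    obtain ⟨c', _, heq⟩ := hx'
    have : r' = r := congrArg Prod.fst heq
    omega

theorem pvPairwise_cells (rows cols : Int) (mines : List (Int × Int)) :
    (pvCells rows cols mines).Pairwise (fun a b => a.1 * cols + a.2 < b.1 * cols + b.2) := by
  unfold pvCells
  rw [List.flatMap_def, List.pairwise_flatten]
  refine ⟨?_, ?_⟩
  · intro s hs
    simp only [List.mem_map] at hs
    obtain ⟨r, _, rfl⟩ := hs
    refine List.Pairwise.map _ ?_ ((PySem.List.pairwise_lt_pyRange_one 0 cols).filter _)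
    intro c c' h
    simpa using h
  · refine List.Pairwise.map _ ?_ (PySem.List.pairwise_lt_pyRange_one 0 rows)
    intro r r' hlt a ha b hb
    simp only [List.mem_map, List.mem_filter, PySem.List.mem_pyRange_one] at ha hb
    obtain ⟨c, ⟨hc, _⟩, rfl⟩ := ha
    obtain ⟨c', ⟨hc', _⟩, rfl⟩ := hb
    simp only
    have hcols : 0 < cols := by omega
    nlinarith [hc.1, hc.2, hc'.1, hc'.2]

theorem pvSorted_eq (rows cols : Int) (mines : List (Int × Int)) :
    PySem.List.sorted
      (PySem.Set.ofList (mines.filter (fun p => decide (0 ≤ p.1 ∧ p.1 < rows ∧ 0 ≤ p.2 ∧ p.2 < cols))))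
      (fun p => p.1 * cols + p.2) false = pvCells rows cols mines := by
  apply PySem.List.sorted_eq_of_perm_of_pairwise_lt
  · rw [List.perm_ext_iff_of_nodup (pvNodup_cells rows cols mines) (PySem.Set.nodup_ofList _)]
    intro p
    rw [pvMem_cells, PySem.Set.mem_ofList, List.mem_filter]
    simp
  · exact pvPairwise_cells rows cols mines

-- ===== VERDICT (by name: the statement is the Claim_ definition above) =====
theorem build_moves_py_spec : Claim_equal_build_moves_py := by
  intro rows cols mines _
  unfold Spec_build_moves_py build_moves_py_alt
  rw [pvA_eq, pvSorted_eq]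
  simp [pvFmt]
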